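-- pv_equiv track=rewrite | github.com/timfornell/CodingTests | CodingTest-SimpleAlgorithms/Task3.py | solution
-- ===== SOURCE A (Python) =====
-- from math import gcd
--
-- def solution(X: list, Y: list):
--     if len(X) != len(Y):
--         return 0
--
--     pairs = []
--     for x, y in zip(X, Y):
--         greatest_common_denominator = gcd(x, y)
--
--         # Make sure to not convert the values to float
--         x = x // greatest_common_denominator
--         y = y // greatest_common_denominator
--
--         # Save in list
--         pairs.append((x, y))
--
--     # Get unique entries in list and count number of occurrences
--     num_entries = [pairs.count(a)for a in set(pairs)]
--     return max(num_entries)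
-- ===== SOURCE B (Python) =====
-- from math import gcd
--
-- def solution(X: list, Y: list):
--     if len(X) != len(Y):
--         return 0
--
--     rem = []
--     for x, y in zip(X, Y):
--         g = gcd(x, y)
--         rem.append((x // g, y // g))
--
--     # Repeatedly strip every occurrence of the first remaining pair;
--     # the number stripped (a length difference) is that pair's multiplicity.
--     best = 0
--     while rem:
--         head = rem[0]
--         rest = [p for p in rem if p != head]
--         best = max(best, len(rem) - len(rest))
--         rem = rest
--     return best
-- ===== Notes on version B (the rewrite author's own statement) =====
-- stated objective: alternative
-- what changed: Instead of building the list of reduced pairs and then counting each distinct pair with pairs.count over set(pairs), B repeatedly strips all occurrences of the first remaining pair by filtering and reads each multiplicity off as a length difference, keeping a running maximum and using no set or counting container.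
import Mathlib
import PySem

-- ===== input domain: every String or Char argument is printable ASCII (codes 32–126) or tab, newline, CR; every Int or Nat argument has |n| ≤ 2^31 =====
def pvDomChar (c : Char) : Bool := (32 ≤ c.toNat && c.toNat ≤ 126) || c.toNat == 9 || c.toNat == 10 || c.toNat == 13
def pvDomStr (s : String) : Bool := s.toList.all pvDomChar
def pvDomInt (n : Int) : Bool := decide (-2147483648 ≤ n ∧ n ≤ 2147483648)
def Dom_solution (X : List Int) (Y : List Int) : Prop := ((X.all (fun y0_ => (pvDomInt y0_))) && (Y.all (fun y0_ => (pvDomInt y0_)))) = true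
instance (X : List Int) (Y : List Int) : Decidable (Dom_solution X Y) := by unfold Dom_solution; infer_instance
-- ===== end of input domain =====

-- B replaces A's "count each distinct reduced pair with pairs.count over set(pairs)" by a
-- successive-stripping loop: filter out all copies of the first remaining pair and read the
-- multiplicity off as a length difference (objective: alternative; no counting container).


-- reduce a pair by its gcd (math.gcd is nonnegative; // is Python floor division)
def pvReduce (p : Int × Int) : Int × Int :=
  let g : Int := (Int.gcd p.1 p.2 : Int)
  (PySem.Int.floordiv p.1 g, PySem.Int.floordiv p.2 g)

-- ===== PORT A =====
def solution (X : List Int) (Y : List Int) : Int :=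
  if X.length ≠ Y.length then 0
  else
    let pairs := (X.zip Y).foldl (fun acc p => acc ++ [pvReduce p]) []
    let numEntries := (PySem.Set.ofList pairs).map (fun a => (pairs.count a : Int))
    ((PySem.List.max? numEntries (fun v => v)).getD 0)

-- ===== PORT B =====
-- the while loop of Source B: strip every copy of the first remaining pair, track the running max
def stripLoop : List (Int × Int) → Int → Int
  | [], best => best
  | h :: t, best =>
    let rest := (h :: t).filter (fun p => p ≠ h)
    stripLoop rest (max best ((((h :: t).length : Int)) - (rest.length : Int)))
termination_by l _ => l.length
decreasing_by
  simp only [List.filter_cons, ne_eq, not_true_eq_false, decide_false, List.length_cons]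
  exact Nat.lt_succ_of_le (List.length_filter_le _ _)

def solution_alt (X : List Int) (Y : List Int) : Int :=
  if X.length ≠ Y.length then 0
  else
    let rem := (X.zip Y).foldl (fun acc p => acc ++ [pvReduce p]) []
    stripLoop rem 0

-- ===== PRECONDITION & SPEC =====
-- Pre_ excludes exactly the inputs where the Python A raises: equal-length empty lists
-- (max of an empty list, ValueError) and any position with x = y = 0 (gcd 0, ZeroDivisionError).
def Pre_solution (X : List Int) (Y : List Int) : Prop :=
  X.length = Y.length → (X ≠ [] ∧ ∀ p ∈ X.zip Y, ¬(p.1 = 0 ∧ p.2 = 0))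
instance (X : List Int) (Y : List Int) : Decidable (Pre_solution X Y) := by unfold Pre_solution; infer_instance
def pvWitness_solution : List Int × List Int := ([2, 4], [4, 8])

def Spec_solution (X : List Int) (Y : List Int) (out : Int) : Prop := out = solution_alt X Y
instance (X : List Int) (Y : List Int) (out : Int) : Decidable (Spec_solution X Y out) := by unfold Spec_solution; infer_instance

-- ===== CLAIM (what is proved, stated in full; the proofs are below) =====
def Claim_equal_solution : Prop := ∀ (X : List Int) (Y : List Int), Dom_solution X Y → Pre_solution X Y → Spec_solution X Y (solution X Y)

-- ===== LEMMAS AND PROOFS =====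

-- A's append loop builds exactly the mapped list
lemma pairs_eq_map (l : List (Int × Int)) :
    l.foldl (fun acc p => acc ++ [pvReduce p]) [] = l.map pvReduce := by
  suffices h : ∀ acc, l.foldl (fun acc p => acc ++ [pvReduce p]) acc = acc ++ l.map pvReduce by
    simpa using h []
  induction l with
  | nil => simp
  | cons a t ih => intro acc; simp [List.foldl, ih]

-- set(h::t) is, up to order, h together with the set of the pairs different from h
lemma ofList_cons_perm (h : Int × Int) (t : List (Int × Int)) :
    (PySem.Set.ofList (h :: t)).Perm (h :: PySem.Set.ofList (t.filter (fun p => p ≠ h))) := by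
  apply (List.perm_ext_iff_of_nodup (PySem.Set.nodup_ofList _) ?_).mpr
  · intro a
    simp [PySem.Set.mem_ofList, List.mem_filter, and_comm]
    tauto
  · refine List.nodup_cons.mpr ⟨?_, PySem.Set.nodup_ofList _⟩
    intro hm
    simp [PySem.Set.mem_ofList, List.mem_filter] at hm

-- the multiplicity of the head equals the length stripped off by the filter
lemma count_head_eq (h : Int × Int) (t : List (Int × Int)) :
    (((h :: t).length : Int)) - (((h :: t).filter (fun p => p ≠ h)).length : Int)
      = ((h :: t).count h : Int) := by
  have h1 := List.length_eq_countP_add_countP (l := h :: t) (p := fun p => decide (p ≠ h))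
  have h2 : (List.filter (fun p => decide (p ≠ h)) (h :: t)).length
      = List.countP (fun p => decide (p ≠ h)) (h :: t) := by
    rw [List.countP_eq_length_filter]
  have hc : List.count h (h :: t) = List.countP (fun a => decide ¬decide (a ≠ h) = true) (h :: t) := by
    unfold List.count
    apply List.countP_congr; intro a _; by_cases hah : a = h <;> simp [hah]
  omega

-- stripping the head's copies does not change the multiplicities of the surviving pairs
lemma count_filter_ne (a h : Int × Int) (t : List (Int × Int)) (hne : a ≠ h) :
    (t.filter (fun p => p ≠ h)).count a = (h :: t).count a := by
  rw [List.count_filter (by simp [hne])]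
  simp [Ne.symm hne]

-- the strip loop computes the running max of the multiplicities of the distinct pairs
lemma stripLoop_eq (l : List (Int × Int)) (b : Int) :
    stripLoop l b = ((PySem.Set.ofList l).map (fun a => (l.count a : Int))).foldl max b := by
  induction hn : l.length using Nat.strong_induction_on generalizing l b with
  | _ n ih =>
  cases l with
  | nil => simp [stripLoop, PySem.Set.ofList]
  | cons h t =>
    rw [stripLoop]
    have hrest : (h :: t).filter (fun p => p ≠ h) = t.filter (fun p => p ≠ h) := by
      simp
    have hlt : ((h :: t).filter (fun p => p ≠ h)).length < n := by
      rw [hrest, ← hn]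
      exact Nat.lt_succ_of_le (List.length_filter_le _ _)
    rw [ih _ hlt _ _ rfl, count_head_eq]
    rw [((ofList_cons_perm h t).map (fun a => ((h :: t).count a : Int))).foldl_eq b]
    have hmap : (PySem.Set.ofList (t.filter (fun p => p ≠ h))).map
          (fun a => ((h :: t).count a : Int))
        = (PySem.Set.ofList ((h :: t).filter (fun p => p ≠ h))).map
          (fun a => (((h :: t).filter (fun p => p ≠ h)).count a : Int)) := by
      rw [hrest]
      symm
      apply List.map_congr_left
      intro a ha
      have ha' : a ∈ t.filter (fun p => p ≠ h) := by
        simpa [PySem.Set.mem_ofList] using ha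
      have hne : a ≠ h := by
        have := (List.mem_filter.mp ha').2
        simpa using this
      rw [← count_filter_ne a h t hne]
    simp only [List.map_cons, List.foldl_cons, hmap]

theorem solution_spec : Claim_equal_solution := by
  intro X Y _ _
  unfold Spec_solution solution solution_alt
  by_cases hlen : X.length = Y.length
  · simp only [hlen, ne_eq, not_true_eq_false, if_false]
    rw [pairs_eq_map, stripLoop_eq]
    set pairs := (X.zip Y).map pvReduce with hp
    cases hset : PySem.Set.ofList pairs with
    | nil => simp [PySem.List.max?]
    | cons a s =>
      have hmem : a ∈ pairs := by
        have h0 : a ∈ PySem.Set.ofList pairs := by rw [hset]; exact List.mem_cons_self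
        simpa [PySem.Set.mem_ofList] using h0
      have hpos : (0 : Int) ≤ (pairs.count a : Int) := by positivity
      rw [List.map_cons, PySem.List.max?_id_cons]
      simp only [Option.getD_some, List.foldl_cons, max_eq_right hpos]
  · simp [hlen]
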